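-- pv_equiv track=rewrite | github.com/mwarden78/NYC-re-tracker | lib/vibe/deployment_followup.py | _platforms_from_files
-- ===== SOURCE A (Python) =====
-- DEPLOYMENT_INDICATORS = [
--     ("fly.toml", "Fly.io", "API / worker hosting"),
--     ("vercel.json", "Vercel", "Web app hosting"),
--     (".env.example", "Env", "Environment variables template"),
-- ]
--
-- def _platforms_from_files(changed_files: list[str]) -> list[tuple[str, str]]:
--     """Derive platforms from a list of changed file paths."""
--     found: list[tuple[str, str]] = []
--     seen: set[str] = set()
--     lower_files = [f.replace("\\", "/").lower() for f in changed_files]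
--     for path_spec, platform_name, desc in DEPLOYMENT_INDICATORS:
--         if platform_name in seen:
--             continue
--         spec_lower = path_spec.lower()
--         for cf in lower_files:
--             if cf.endswith(spec_lower) or spec_lower in cf:
--                 found.append((platform_name, desc))
--                 seen.add(platform_name)
--                 break
--     return found
-- ===== SOURCE B (Python) =====
-- DEPLOYMENT_INDICATORS = [
--     ("fly.toml", "Fly.io", "API / worker hosting"),
--     ("vercel.json", "Vercel", "Web app hosting"),
--     (".env.example", "Env", "Environment variables template"),
-- ]
--
-- def _platforms_from_files(changed_files: list[str]) -> list[tuple[str, str]]: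
--     """Derive platforms from a list of changed file paths."""
--     matched: set[str] = set()
--     for f in changed_files:
--         cf = f.replace("\\", "/").lower()
--         for path_spec, platform_name, _desc in DEPLOYMENT_INDICATORS:
--             if path_spec.lower() in cf:
--                 matched.add(platform_name)
--     return [(name, desc) for _spec, name, desc in DEPLOYMENT_INDICATORS if name in matched]
-- ===== Notes on version B (the rewrite author's own statement) =====
-- stated objective: alternative
-- what changed: Replaces A's indicator-outer nested loop with break and a redundant 'seen' set by a file-outer collect pass (matched platform names into a set, using that 'endswith or in' is just 'in') followed by an emit pass over DEPLOYMENT_INDICATORS that preserves indicator order.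
import Mathlib
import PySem

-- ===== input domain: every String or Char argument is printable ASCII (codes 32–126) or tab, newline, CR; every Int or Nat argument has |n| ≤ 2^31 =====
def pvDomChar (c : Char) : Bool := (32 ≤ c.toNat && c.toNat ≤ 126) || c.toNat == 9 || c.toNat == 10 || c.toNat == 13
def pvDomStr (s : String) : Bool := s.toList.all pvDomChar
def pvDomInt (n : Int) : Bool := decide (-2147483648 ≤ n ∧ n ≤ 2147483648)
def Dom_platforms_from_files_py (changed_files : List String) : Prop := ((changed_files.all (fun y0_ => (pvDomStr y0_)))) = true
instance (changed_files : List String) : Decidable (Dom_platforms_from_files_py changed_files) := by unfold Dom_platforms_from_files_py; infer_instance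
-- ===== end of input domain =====

-- B replaces A's indicator-outer nested loop (with break and a 'seen' set) by a file-outer collect
-- pass into a set of matched platform names plus an order-preserving emit pass over the indicators;
-- alternative decomposition, same cost.

-- module constant DEPLOYMENT_INDICATORS
def pvIndicators : List (String × String × String) :=
  [("fly.toml", "Fly.io", "API / worker hosting"),
   ("vercel.json", "Vercel", "Web app hosting"),
   (".env.example", "Env", "Environment variables template")]

-- ===== PORT A =====
def platforms_from_files_py (changed_files : List String) : List (String × String) :=
  let lower_files := changed_files.map (fun f => PySem.Str.lower (PySem.Str.replace f "\\" "/"))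
  (pvIndicators.foldl
    (fun (st : List (String × String) × PySem.Set String) ind =>
      if PySem.Set.contains st.2 ind.2.1 then st
      else
        let spec_lower := PySem.Str.lower ind.1
        -- inner 'for cf in lower_files: … break' appends once if some file matches
        if lower_files.any (fun cf => PySem.Str.endswith cf spec_lower || PySem.Str.isIn spec_lower cf) then
          (st.1 ++ [(ind.2.1, ind.2.2)], PySem.Set.add st.2 ind.2.1)
        else st)
    ([], PySem.Set.empty)).1

-- ===== PORT B =====
def platforms_from_files_py_alt (changed_files : List String) : List (String × String) :=
  let matched := changed_files.foldl
    (fun (m : PySem.Set String) f =>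
      let cf := PySem.Str.lower (PySem.Str.replace f "\\" "/")
      pvIndicators.foldl
        (fun m ind => if PySem.Str.isIn (PySem.Str.lower ind.1) cf then PySem.Set.add m ind.2.1 else m) m)
    PySem.Set.empty
  (pvIndicators.filter (fun ind => PySem.Set.contains matched ind.2.1)).map
    (fun ind => (ind.2.1, ind.2.2))

-- ===== PRECONDITION & SPEC =====
def Spec_platforms_from_files_py (changed_files : List String) (out : List (String × String)) : Prop := out = platforms_from_files_py_alt changed_files
instance (changed_files : List String) (out : List (String × String)) : Decidable (Spec_platforms_from_files_py changed_files out) := by unfold Spec_platforms_from_files_py; infer_instance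

-- ===== CLAIM (what is proved, stated in full; the proofs are below) =====
def Claim_equal_platforms_from_files_py : Prop := ∀ (changed_files : List String), Dom_platforms_from_files_py changed_files → Spec_platforms_from_files_py changed_files (platforms_from_files_py changed_files)

-- ===== LEMMAS AND PROOFS =====

-- whether some file (backslashes normalized, lowered) contains spec as a substring
def pvHit (files : List String) (spec : String) : Bool :=
  files.any (fun f => PySem.Str.isIn spec (PySem.Str.lower (PySem.Str.replace f "\\" "/")))

-- 'cf.endswith(s) or s in cf' is just 's in cf' (a suffix is an infix)
theorem pv_endswith_or_isIn (cf s : String) :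
    (PySem.Str.endswith cf s || PySem.Str.isIn s cf) = PySem.Str.isIn s cf := by
  cases h : PySem.Str.endswith cf s
  · simp
  · have hsuf : s.toList <:+ cf.toList := by
      rw [← PySem.Chars.endswith_iff]; simpa using h
    have h2 : PySem.Chars.isIn s.toList cf.toList = true :=
      (PySem.Chars.isIn_iff_infix _ _).mpr hsuf.isInfix
    simp [h2]

theorem pv_contains_empty (name : String) :
    PySem.Set.contains PySem.Set.empty name = false := by
  simp [PySem.Set.empty, PySem.Set.contains_eq_listContains]

-- A's result, characterised per indicator
theorem pvA_eq (files : List String) :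
    platforms_from_files_py files =
      (if pvHit files "fly.toml" then [("Fly.io", "API / worker hosting")] else []) ++
      (if pvHit files "vercel.json" then [("Vercel", "Web app hosting")] else []) ++
      (if pvHit files ".env.example" then [("Env", "Environment variables template")] else []) := by
  have hl1 : PySem.Str.lower "fly.toml" = "fly.toml" := by decide
  have hl2 : PySem.Str.lower "vercel.json" = "vercel.json" := by decide
  have hl3 : PySem.Str.lower ".env.example" = ".env.example" := by decide
  unfold platforms_from_files_py pvIndicators pvHit
  simp only [List.foldl, hl1, hl2, hl3, pv_endswith_or_isIn, List.any_map, Function.comp_def]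
  cases h1 : files.any (fun f => PySem.Str.isIn "fly.toml" (PySem.Str.lower (PySem.Str.replace f "\\" "/"))) <;>
  cases h2 : files.any (fun f => PySem.Str.isIn "vercel.json" (PySem.Str.lower (PySem.Str.replace f "\\" "/"))) <;>
  cases h3 : files.any (fun f => PySem.Str.isIn ".env.example" (PySem.Str.lower (PySem.Str.replace f "\\" "/"))) <;>
  simp [PySem.Set.add, PySem.Set.contains, PySem.Set.empty]

-- membership in B's matched set after the collect pass
theorem pv_fold_contains (name : String)
    (hn : name = "Fly.io" ∨ name = "Vercel" ∨ name = "Env")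
    (spec : String)
    (hs : (name = "Fly.io" → spec = "fly.toml") ∧ (name = "Vercel" → spec = "vercel.json") ∧
          (name = "Env" → spec = ".env.example")) :
    ∀ (files : List String) (m : PySem.Set String),
      PySem.Set.contains
        (files.foldl
          (fun (m : PySem.Set String) f =>
            let cf := PySem.Str.lower (PySem.Str.replace f "\\" "/")
            pvIndicators.foldl
              (fun m ind => if PySem.Str.isIn (PySem.Str.lower ind.1) cf then PySem.Set.add m ind.2.1 else m) m)
          m) name
      = (PySem.Set.contains m name || pvHit files spec) := by
  have hl1 : PySem.Str.lower "fly.toml" = "fly.toml" := by decide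
  have hl2 : PySem.Str.lower "vercel.json" = "vercel.json" := by decide
  have hl3 : PySem.Str.lower ".env.example" = ".env.example" := by decide
  intro files
  induction files with
  | nil => intro m; simp [pvHit]
  | cons f fs ih =>
    intro m
    rw [List.foldl_cons, ih]
    have hstep : ∀ (m : PySem.Set String),
        PySem.Set.contains
          (pvIndicators.foldl
            (fun m ind => if PySem.Str.isIn (PySem.Str.lower ind.1)
                (PySem.Str.lower (PySem.Str.replace f "\\" "/")) then PySem.Set.add m ind.2.1 else m) m) name
        = (PySem.Set.contains m name ||
            PySem.Str.isIn spec (PySem.Str.lower (PySem.Str.replace f "\\" "/"))) := by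
      intro m
      rcases hn with h | h | h <;>
        · obtain ⟨e1, e2, e3⟩ := hs
          subst h
          simp_all only []
          simp only [pvIndicators, List.foldl, hl1, hl2, hl3]
          split_ifs <;> simp_all
    simp only [hstep, pvHit, List.any_cons, Bool.or_assoc]

-- B's result, characterised per indicator (same right-hand side as pvA_eq)
theorem pvB_eq (files : List String) :
    platforms_from_files_py_alt files =
      (if pvHit files "fly.toml" then [("Fly.io", "API / worker hosting")] else []) ++
      (if pvHit files "vercel.json" then [("Vercel", "Web app hosting")] else []) ++
      (if pvHit files ".env.example" then [("Env", "Environment variables template")] else []) := by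
  have c1 := pv_fold_contains "Fly.io" (by decide) "fly.toml" (by decide) files PySem.Set.empty
  have c2 := pv_fold_contains "Vercel" (by decide) "vercel.json" (by decide) files PySem.Set.empty
  have c3 := pv_fold_contains "Env" (by decide) ".env.example" (by decide) files PySem.Set.empty
  unfold platforms_from_files_py_alt
  simp only [pv_contains_empty, Bool.false_or] at c1 c2 c3
  simp only [pvIndicators] at c1 c2 c3 ⊢
  simp only [List.filter_cons, List.filter_nil, c1, c2, c3]
  cases h1 : pvHit files "fly.toml" <;> cases h2 : pvHit files "vercel.json" <;>
    cases h3 : pvHit files ".env.example" <;> simp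

-- ===== VERDICT (by name: the statement is the Claim_ definition above) =====
theorem platforms_from_files_py_spec : Claim_equal_platforms_from_files_py := by
  intro files _
  unfold Spec_platforms_from_files_py
  rw [pvA_eq, pvB_eq]
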